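-- pv_equiv track=rewrite | github.com/PauloSolis/ServicioNefro | Doctores/views.py | evaluate_data
-- ===== SOURCE A (Python) =====
-- def evaluate_data(datos):
--     correct = []
--     incorrect = []
--     for formulario in datos:
--         zippend((correct, incorrect), evaluate_questions(formulario))
--     res_correct = [sum(x) for x in zip(*correct)]
--     res_incorrect = [sum(x) for x in zip(*incorrect)]
--     return res_correct, res_incorrect
--
-- def evaluate_questions(formulario):
--     correct = [0,0,0,0,0,0,0,0,0,0,0,0,0,0,0,0,0,0,0,0]
--     incorrect = [0,0,0,0,0,0,0,0,0,0,0,0,0,0,0,0,0,0,0,0]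
--     current = 0
--     for question in formulario.values():
--         if question == -1:
--             correct[current] += 1
--         else:
--             incorrect[current] += 1
--         current += 1
--         current = current%20
--
--     return correct, incorrect
--
-- def zippend(lists, values):
--   assert len(lists) == len(values)
--   for l,v in zip(lists, values):
--     l.append(v)
-- ===== SOURCE B (Python) =====
-- def evaluate_data(datos):
--     if not datos:
--         return [], []
--     res_correct = [0] * 20
--     res_incorrect = [0] * 20
--     for formulario in datos:
--         for i, question in enumerate(formulario.values()):
--             if question == -1:
--                 res_correct[i % 20] += 1
--             else:
--                 res_incorrect[i % 20] += 1
--     return res_correct, res_incorrect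
-- ===== Notes on version B (the rewrite author's own statement) =====
-- stated objective: simpler
-- what changed: Instead of building a list of per-form 20-vectors via evaluate_questions/zippend and then zip-transposing and summing columns, B makes a single pass that increments two running 20-slot accumulators in place and returns them (with ([],[]) for empty input).
import Mathlib
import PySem

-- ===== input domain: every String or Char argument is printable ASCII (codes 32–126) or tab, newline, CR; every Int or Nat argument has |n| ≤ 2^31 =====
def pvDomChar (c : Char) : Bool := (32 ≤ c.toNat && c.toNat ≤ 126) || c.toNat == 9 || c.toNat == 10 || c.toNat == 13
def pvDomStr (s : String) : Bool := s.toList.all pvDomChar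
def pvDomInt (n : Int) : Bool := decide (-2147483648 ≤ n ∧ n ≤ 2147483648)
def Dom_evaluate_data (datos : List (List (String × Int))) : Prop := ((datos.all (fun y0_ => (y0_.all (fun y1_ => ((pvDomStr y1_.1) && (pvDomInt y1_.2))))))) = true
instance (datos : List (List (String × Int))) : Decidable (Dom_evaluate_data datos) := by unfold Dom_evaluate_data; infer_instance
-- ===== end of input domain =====

-- B replaces A's build-per-form-vectors-then-zip-transpose-and-sum with one pass
-- that adds every answer directly into two running 20-slot accumulators (objective: simpler).

-- ===== PORT A =====
-- zip(*ls) truncates to the shortest row (and zip() of no rows is empty), so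
-- [sum(x) for x in zip(*ls)] sums the first min-length columns; [] when ls = [].
-- Every row index j stays below every row length here, so getD is exact.
def pyZipSum (ls : List (List Int)) : List Int :=
  match ls with
  | [] => []
  | l :: rest =>
      (List.range (rest.foldl (fun m x => min m x.length) l.length)).map
        (fun j => (ls.map (fun r => r.getD j 0)).sum)

-- the body of evaluate_questions' for-loop; `current` is always non-negative in
-- the Python (it is taken % 20 each step), so it is carried as a Nat, and it is
-- < 20 = len(correct), so the increments never raise (getD/set are exact).
def aStep (st : List Int × List Int × Nat) (question : Int) : List Int × List Int × Nat :=
  if question == -1 then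
    (st.1.set st.2.2 (st.1.getD st.2.2 0 + 1), st.2.1, (st.2.2 + 1) % 20)
  else
    (st.1, st.2.1.set st.2.2 (st.2.1.getD st.2.2 0 + 1), (st.2.2 + 1) % 20)

def evaluate_questions (formulario : List (String × Int)) : List Int × List Int :=
  let st := ((PySem.Dict.ofList formulario).values).foldl aStep
    ([0,0,0,0,0,0,0,0,0,0,0,0,0,0,0,0,0,0,0,0],
     [0,0,0,0,0,0,0,0,0,0,0,0,0,0,0,0,0,0,0,0], 0)
  (st.1, st.2.1)

-- zippend((correct, incorrect), r) appends r.1 to correct and r.2 to incorrect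
def evaluate_data (datos : List (List (String × Int))) : List Int × List Int :=
  let p := datos.foldl
    (fun (p : List (List Int) × List (List Int)) formulario =>
      let r := evaluate_questions formulario
      (p.1 ++ [r.1], p.2 ++ [r.2])) ([], [])
  (pyZipSum p.1, pyZipSum p.2)

-- ===== PORT B =====
-- the inner `for i, question in enumerate(...)` loop; i % 20 < 20 = len(res_*),
-- so the in-place increments never raise (getD/set are exact).
def bAccum : List Int → Nat → List Int → List Int → List Int × List Int
  | [], _, rc, ri => (rc, ri)
  | question :: rest, i, rc, ri =>
    if question == -1 then
      bAccum rest (i + 1) (rc.set (i % 20) (rc.getD (i % 20) 0 + 1)) ri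
    else
      bAccum rest (i + 1) rc (ri.set (i % 20) (ri.getD (i % 20) 0 + 1))

def evaluate_data_alt (datos : List (List (String × Int))) : List Int × List Int :=
  if datos.isEmpty then ([], [])
  else
    datos.foldl
      (fun (acc : List Int × List Int) formulario =>
        bAccum (PySem.Dict.ofList formulario).values 0 acc.1 acc.2)
      (List.replicate 20 0, List.replicate 20 0)

-- ===== PRECONDITION & SPEC =====
def Spec_evaluate_data (datos : List (List (String × Int))) (out : List Int × List Int) : Prop := out = evaluate_data_alt datos
instance (datos : List (List (String × Int))) (out : List Int × List Int) : Decidable (Spec_evaluate_data datos out) := by unfold Spec_evaluate_data; infer_instance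

-- ===== CLAIM (what is proved, stated in full; the proofs are below) =====
def Claim_equal_evaluate_data : Prop := ∀ (datos : List (List (String × Int))), Dom_evaluate_data datos → Spec_evaluate_data datos (evaluate_data datos)

-- ===== LEMMAS AND PROOFS =====

def addVec (a b : List Int) : List Int := List.zipWith (· + ·) a b

theorem addVec_length (a b : List Int) (ha : a.length = 20) (hb : b.length = 20) :
    (addVec a b).length = 20 := by simp [addVec, ha, hb]

theorem addVec_zero (a : List Int) (ha : a.length = 20) :
    addVec a (List.replicate 20 0) = a := by
  apply List.ext_getElem
  · simp [addVec, ha]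
  · intro i h1 h2
    have hi : i < 20 := by omega
    simp only [addVec, List.getElem_zipWith, List.getElem_replicate, add_zero]

theorem addVec_getD (a b : List Int) (k : Nat) (hk : k < 20)
    (ha : a.length = 20) (hb : b.length = 20) :
    (addVec a b).getD k 0 = a.getD k 0 + b.getD k 0 := by
  have hab : (addVec a b).length = 20 := addVec_length a b ha hb
  rw [List.getD_eq_getElem a 0 (by omega), List.getD_eq_getElem b 0 (by omega),
      List.getD_eq_getElem _ 0 (by omega)]
  simp [addVec]

theorem addVec_set (a b : List Int) : ∀ (k : Nat),
    (addVec a b).set k ((addVec a b).getD k 0 + 1) =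
      addVec a (b.set k (b.getD k 0 + 1)) := by
  induction a generalizing b with
  | nil => intro k; simp [addVec]
  | cons x a' iha =>
    intro k
    cases b with
    | nil => simp [addVec]
    | cons y b' =>
      cases k with
      | zero =>
        simp only [addVec, List.zipWith_cons_cons, List.getD_cons_zero, List.set_cons_zero]
        rw [show x + y + 1 = x + (y + 1) by ring]
      | succ k =>
        simp only [addVec, List.zipWith_cons_cons, List.getD_cons_succ, List.set_cons_succ]
        exact congrArg _ (iha b' k)

theorem bAccum_eq (vs : List Int) : ∀ (n : Nat) (rc ri c ic : List Int),
    rc.length = 20 → ri.length = 20 → c.length = 20 → ic.length = 20 →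
    bAccum vs n (addVec rc c) (addVec ri ic) =
      (addVec rc (vs.foldl aStep (c, ic, n % 20)).1,
       addVec ri (vs.foldl aStep (c, ic, n % 20)).2.1) := by
  induction vs with
  | nil => intro n rc ri c ic h1 h2 h3 h4; simp [bAccum]
  | cons q rest ih =>
    intro n rc ri c ic h1 h2 h3 h4
    have hmod : (n % 20 + 1) % 20 = (n + 1) % 20 := by omega
    cases hq : (q == (-1 : Int)) with
    | true =>
      simp only [bAccum, List.foldl_cons, aStep, hq, if_true]
      rw [addVec_set rc c (n % 20),
          ih (n + 1) rc ri (c.set (n % 20) (c.getD (n % 20) 0 + 1)) ic h1 h2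
            (by simp [h3]) h4, hmod]
    | false =>
      simp only [bAccum, List.foldl_cons, aStep, hq, Bool.false_eq_true, if_false]
      rw [addVec_set ri ic (n % 20),
          ih (n + 1) rc ri c (ic.set (n % 20) (ic.getD (n % 20) 0 + 1)) h1 h2 h3
            (by simp [h4]), hmod]

theorem foldl_aStep_len (vs : List Int) : ∀ (c ic : List Int) (cur : Nat),
    c.length = 20 → ic.length = 20 →
    (vs.foldl aStep (c, ic, cur)).1.length = 20 ∧
    (vs.foldl aStep (c, ic, cur)).2.1.length = 20 := by
  induction vs with
  | nil => intro c ic cur h1 h2; exact ⟨h1, h2⟩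
  | cons q rest ih =>
    intro c ic cur h1 h2
    cases hq : (q == (-1 : Int)) with
    | true =>
      simp only [List.foldl_cons, aStep, hq, if_true]
      exact ih _ _ _ (by simp [h1]) h2
    | false =>
      simp only [List.foldl_cons, aStep, hq, Bool.false_eq_true, if_false]
      exact ih _ _ _ h1 (by simp [h2])

theorem eq_len (f : List (String × Int)) :
    (evaluate_questions f).1.length = 20 ∧ (evaluate_questions f).2.length = 20 := by
  unfold evaluate_questions
  exact foldl_aStep_len _ _ _ _ rfl rfl

theorem bAccum_eval (f : List (String × Int)) (rc ri : List Int)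
    (hrc : rc.length = 20) (hri : ri.length = 20) :
    bAccum (PySem.Dict.ofList f).values 0 rc ri =
      (addVec rc (evaluate_questions f).1, addVec ri (evaluate_questions f).2) := by
  have hz : (List.replicate 20 (0 : Int)).length = 20 := by simp
  have h := bAccum_eq (PySem.Dict.ofList f).values 0 rc ri
      (List.replicate 20 0) (List.replicate 20 0) hrc hri hz hz
  rw [addVec_zero rc hrc, addVec_zero ri hri] at h
  unfold evaluate_questions
  exact h

theorem colSum (cs : List (List Int)) : ∀ (acc : List Int), acc.length = 20 →
    (∀ c ∈ cs, c.length = 20) →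
    cs.foldl addVec acc =
      (List.range 20).map (fun j => acc.getD j 0 + (cs.map (fun r => r.getD j 0)).sum) := by
  induction cs with
  | nil =>
    intro acc ha _
    simp only [List.foldl_nil, List.map_nil, List.sum_nil, add_zero]
    apply List.ext_getElem
    · simp [ha]
    · intro i h1 h2
      simp only [List.getElem_map, List.getElem_range]
      rw [List.getD_eq_getElem acc 0 (by simp at h2; omega)]
  | cons c rest ih =>
    intro acc ha hmem
    have hc : c.length = 20 := hmem c (by simp)
    rw [List.foldl_cons,
        ih (addVec acc c) (addVec_length acc c ha hc) (fun x hx => hmem x (by simp [hx]))]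
    apply List.map_congr_left
    intro j hj
    have hj20 : j < 20 := List.mem_range.mp hj
    rw [addVec_getD acc c j hj20 ha hc]
    simp only [List.map_cons, List.sum_cons]
    ring

theorem foldl_pairs (l : List (List (String × Int))) : ∀ (a b : List (List Int)),
    l.foldl
      (fun (p : List (List Int) × List (List Int)) formulario =>
        let r := evaluate_questions formulario
        (p.1 ++ [r.1], p.2 ++ [r.2])) (a, b)
    = (a ++ l.map (fun f => (evaluate_questions f).1),
       b ++ l.map (fun f => (evaluate_questions f).2)) := by
  induction l with
  | nil => intro a b; simp
  | cons f rest ih => intro a b; simp [List.foldl_cons, ih]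

theorem foldl_min_20 (ls : List (List Int)) (h : ∀ x ∈ ls, x.length = 20) :
    ls.foldl (fun (m : Nat) (x : List Int) => min m x.length) 20 = 20 := by
  induction ls with
  | nil => rfl
  | cons c rest ih =>
    have hc : c.length = 20 := h c (by simp)
    simp only [List.foldl_cons, hc, min_self]
    exact ih (fun x hx => h x (by simp [hx]))

theorem pyZipSum_cols (cs : List (List Int)) (hne : cs ≠ [])
    (h : ∀ c ∈ cs, c.length = 20) :
    pyZipSum cs = (List.range 20).map (fun j => (cs.map (fun r => r.getD j 0)).sum) := by
  match cs, hne with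
  | c :: rest, _ =>
    have hc : c.length = 20 := h c (by simp)
    show (List.range (rest.foldl (fun m x => min m x.length) c.length)).map
        (fun j => ((c :: rest).map (fun r => r.getD j 0)).sum) =
      (List.range 20).map (fun j => ((c :: rest).map (fun r => r.getD j 0)).sum)
    rw [hc, foldl_min_20 rest (fun x hx => h x (by simp [hx]))]

theorem outer_fold (ds : List (List (String × Int))) : ∀ (rc ri : List Int),
    rc.length = 20 → ri.length = 20 →
    ds.foldl
      (fun (acc : List Int × List Int) formulario =>
        bAccum (PySem.Dict.ofList formulario).values 0 acc.1 acc.2) (rc, ri)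
    = ((ds.map (fun f => (evaluate_questions f).1)).foldl addVec rc,
       (ds.map (fun f => (evaluate_questions f).2)).foldl addVec ri) := by
  induction ds with
  | nil => intro rc ri _ _; rfl
  | cons f rest ih =>
    intro rc ri hrc hri
    simp only [List.foldl_cons, List.map_cons]
    rw [bAccum_eval f rc ri hrc hri]
    exact ih _ _ (addVec_length _ _ hrc (eq_len f).1) (addVec_length _ _ hri (eq_len f).2)

-- ===== VERDICT (by name: the statement is the Claim_ definition above) =====
theorem evaluate_data_spec : Claim_equal_evaluate_data := by
  intro datos _
  unfold Spec_evaluate_data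
  cases datos with
  | nil => rfl
  | cons d rest =>
    have hz : (List.replicate 20 (0 : Int)).length = 20 := by simp
    have hmem1 : ∀ c ∈ (d :: rest).map (fun f => (evaluate_questions f).1), c.length = 20 := by
      intro c hc
      rcases List.mem_map.mp hc with ⟨f, _, rfl⟩
      exact (eq_len f).1
    have hmem2 : ∀ c ∈ (d :: rest).map (fun f => (evaluate_questions f).2), c.length = 20 := by
      intro c hc
      rcases List.mem_map.mp hc with ⟨f, _, rfl⟩
      exact (eq_len f).2
    show evaluate_data (d :: rest) = evaluate_data_alt (d :: rest)
    unfold evaluate_data evaluate_data_alt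
    rw [foldl_pairs]
    simp only [List.nil_append, List.isEmpty_cons, Bool.false_eq_true, if_false]
    rw [outer_fold (d :: rest) _ _ hz hz,
        colSum _ _ hz hmem1, colSum _ _ hz hmem2,
        pyZipSum_cols _ (by simp) hmem1, pyZipSum_cols _ (by simp) hmem2]
    simp only [Prod.mk.injEq]
    refine ⟨?_, ?_⟩ <;>
      · apply List.map_congr_left
        intro j hj
        have hj20 : j < 20 := List.mem_range.mp hj
        rw [List.getD_eq_getElem (List.replicate 20 0) 0 (by simpa using hj20),
            List.getElem_replicate, zero_add]
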